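-- pv_equiv track=rewrite | github.com/GabrielaCedillo/ProyectoFinal | E1FuerzaBruta.py | caminos_posibles_fuerza_bruta
-- ===== SOURCE A (Python) =====
-- def caminos_posibles_fuerza_bruta(m, n):
--     x, y = 0, 0
--     destino = (m - 1, n - 1)
--     caminos = []
--     visitados = set()  # Para evitar visitar la misma casilla más de una vez
--     visitados.add((x, y))
--
--     # Lista de posiciones a explorar
--     posiciones = [([(0, 0)], (x, y))]
--
--     while posiciones:
--         camino, (x, y) = posiciones.pop(0)
--
--         # Si llegamos al destino, guardamos el camino
--         if (x, y) == destino: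
--             caminos.append(camino)
--             continue
--
--         # Movimientos hacia la derecha: avanzar 3 casillas, solo si es posible
--         if y + 3 < n and (x, y + 3) not in visitados:
--             posiciones.append((camino + [(x, y + 3)], (x, y + 3)))
--             visitados.add((x, y + 3))
--
--         # Movimientos hacia abajo: avanzar 2 casillas, solo si es posible
--         if x + 2 < m and (x + 2, y) not in visitados:
--             posiciones.append((camino + [(x + 2, y)], (x + 2, y)))
--             visitados.add((x + 2, y))
--
--     return caminos
-- ===== SOURCE B (Python) =====
-- def caminos_posibles_fuerza_bruta(m, n):
--     # BFS over cells with parent pointers; reconstruct the single path at the end.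
--     destino = (m - 1, n - 1)
--     parent = {(0, 0): None}   # also serves as the visited set
--     cola = [(0, 0)]
--     head = 0
--     while head < len(cola):
--         x, y = cola[head]
--         head += 1
--         if (x, y) == destino:
--             camino = []
--             cur = (x, y)
--             while cur is not None:
--                 camino.append(cur)
--                 cur = parent[cur]
--             camino.reverse()
--             return [camino]
--         if y + 3 < n and (x, y + 3) not in parent:
--             parent[(x, y + 3)] = (x, y)
--             cola.append((x, y + 3))
--         if x + 2 < m and (x + 2, y) not in parent:
--             parent[(x + 2, y)] = (x, y)
--             cola.append((x + 2, y))
--     return []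
-- ===== Notes on version B (the rewrite author's own statement) =====
-- stated objective: faster
-- what changed: Replaces the queue of (full path copy, cell) pairs consumed by O(V) list.pop(0) with an index-advanced BFS queue of cells plus a parent-pointer dict (doubling as the visited set), returning immediately when the destination is dequeued and reconstructing the single path once at the end.
import Mathlib
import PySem

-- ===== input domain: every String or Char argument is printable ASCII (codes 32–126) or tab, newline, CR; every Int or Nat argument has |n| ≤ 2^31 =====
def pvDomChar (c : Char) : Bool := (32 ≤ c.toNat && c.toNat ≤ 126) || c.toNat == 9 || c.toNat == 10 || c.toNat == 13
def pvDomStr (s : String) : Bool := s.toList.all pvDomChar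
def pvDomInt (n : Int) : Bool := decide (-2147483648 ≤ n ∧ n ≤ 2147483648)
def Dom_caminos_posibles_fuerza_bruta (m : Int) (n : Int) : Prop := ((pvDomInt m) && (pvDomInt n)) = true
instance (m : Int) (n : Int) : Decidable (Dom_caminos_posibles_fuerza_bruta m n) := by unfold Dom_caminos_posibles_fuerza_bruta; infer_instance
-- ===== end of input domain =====

-- B replaces A's path-copying pop(0) BFS by a cell-only BFS with parent pointers and a
-- single path reconstruction at the end (measurably faster; return value proved equal).


-- ===== PORT A =====
-- A's `while posiciones:` loop; fuel m.toNat * n.toNat + 1 bounds the iteration count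
-- (each iteration pops one element, every enqueue marks a fresh grid cell visited).
def pvALoop (m : Int) (n : Int) :
    Nat → List (List (Int × Int) × (Int × Int)) → PySem.Set (Int × Int) →
    List (List (Int × Int)) → List (List (Int × Int))
  | 0, _, _, cam => cam
  | _ + 1, [], _, cam => cam
  | f + 1, (camino, (x, y)) :: rest, vis, cam =>
    if (x, y) = (m - 1, n - 1) then
      pvALoop m n f rest vis (cam ++ [camino])
    else
      let s1 : List (List (Int × Int) × (Int × Int)) × PySem.Set (Int × Int) :=
        if y + 3 < n ∧ (x, y + 3) ∉ vis then
          (rest ++ [(camino ++ [(x, y + 3)], (x, y + 3))], PySem.Set.add vis (x, y + 3))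
        else (rest, vis)
      let s2 : List (List (Int × Int) × (Int × Int)) × PySem.Set (Int × Int) :=
        if x + 2 < m ∧ (x + 2, y) ∉ s1.2 then
          (s1.1 ++ [(camino ++ [(x + 2, y)], (x + 2, y))], PySem.Set.add s1.2 (x + 2, y))
        else s1
      pvALoop m n f s2.1 s2.2 cam

def caminos_posibles_fuerza_bruta (m : Int) (n : Int) : List (List (Int × Int)) :=
  pvALoop m n (m.toNat * n.toNat + 1)
    [([(0, 0)], (0, 0))] (PySem.Set.add PySem.Set.empty (0, 0)) []

-- ===== PORT B =====
-- B's inner `while cur is not None:` parent walk; fuel parent.keys.length bounds the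
-- chain length (the parent chain visits distinct keys of `parent`).
def pvWalk (parent : PySem.Dict (Int × Int) (Option (Int × Int))) :
    Nat → (Int × Int) → List (Int × Int)
  | 0, cur => [cur]
  | f + 1, cur =>
    match parent.get? cur with
    | some (some p) => cur :: pvWalk parent f p
    | _ => [cur]

-- B's `while head < len(cola):` loop; the list argument is cola[head:], the fuel is the
-- same iteration bound as A's.
def pvBLoop (m : Int) (n : Int) :
    Nat → List (Int × Int) → PySem.Dict (Int × Int) (Option (Int × Int)) →
    List (List (Int × Int))
  | 0, _, _ => []
  | _ + 1, [], _ => []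
  | f + 1, (x, y) :: rest, parent =>
    if (x, y) = (m - 1, n - 1) then
      [(pvWalk parent parent.keys.length (x, y)).reverse]
    else
      let s1 : List (Int × Int) × PySem.Dict (Int × Int) (Option (Int × Int)) :=
        if y + 3 < n ∧ parent.get? (x, y + 3) = none then
          (rest ++ [(x, y + 3)], parent.insert (x, y + 3) (some (x, y)))
        else (rest, parent)
      let s2 : List (Int × Int) × PySem.Dict (Int × Int) (Option (Int × Int)) :=
        if x + 2 < m ∧ s1.2.get? (x + 2, y) = none then
          (s1.1 ++ [(x + 2, y)], s1.2.insert (x + 2, y) (some (x, y)))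
        else s1
      pvBLoop m n f s2.1 s2.2

def caminos_posibles_fuerza_bruta_alt (m : Int) (n : Int) : List (List (Int × Int)) :=
  pvBLoop m n (m.toNat * n.toNat + 1)
    [(0, 0)] (PySem.Dict.insert PySem.Dict.empty (0, 0) none)

-- ===== PRECONDITION & SPEC =====
def Spec_caminos_posibles_fuerza_bruta (m : Int) (n : Int) (out : List (List (Int × Int))) : Prop := out = caminos_posibles_fuerza_bruta_alt m n
instance (m : Int) (n : Int) (out : List (List (Int × Int))) : Decidable (Spec_caminos_posibles_fuerza_bruta m n out) := by unfold Spec_caminos_posibles_fuerza_bruta; infer_instance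

-- ===== CLAIM (what is proved, stated in full; the proofs are below) =====
def Claim_equal_caminos_posibles_fuerza_bruta : Prop := ∀ (m : Int) (n : Int), Dom_caminos_posibles_fuerza_bruta m n → Spec_caminos_posibles_fuerza_bruta m n (caminos_posibles_fuerza_bruta m n)

-- ===== LEMMAS AND PROOFS =====

-- `l` (latest cell first) is a parent chain of `parent` ending at the start cell (0,0).
def pvRChain (parent : PySem.Dict (Int × Int) (Option (Int × Int))) : List (Int × Int) → Prop
  | [] => False
  | [c] => c = (0, 0) ∧ parent.get? c = some none
  | c :: d :: t => parent.get? c = some (some d) ∧ pvRChain parent (d :: t)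

-- A queued pair (camino, pos): camino reversed is a parent chain headed by pos, camino
-- has no duplicates, and every cell of camino is visited.
def pvChainPair (parent : PySem.Dict (Int × Int) (Option (Int × Int)))
    (vis : PySem.Set (Int × Int)) (pr : List (Int × Int) × (Int × Int)) : Prop :=
  pvRChain parent pr.1.reverse ∧ pr.1.reverse.head? = some pr.2 ∧
    pr.1.Nodup ∧ ∀ c ∈ pr.1, c ∈ vis

-- The simulation invariant between A's state (queue of pairs, visited set) and B's
-- state (queue of cells, parent dict).
def pvInv (q : List (List (Int × Int) × (Int × Int))) (vis : PySem.Set (Int × Int))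
    (parent : PySem.Dict (Int × Int) (Option (Int × Int))) : Prop :=
  (∀ c : Int × Int, c ∈ vis ↔ parent.get? c ≠ none) ∧ parent.keys.Nodup ∧
    (q.map Prod.snd).Nodup ∧ ∀ pr ∈ q, pvChainPair parent vis pr

lemma pvRChain_mem_isSome (parent : PySem.Dict (Int × Int) (Option (Int × Int)))
    (l : List (Int × Int)) (h : pvRChain parent l) : ∀ c ∈ l, parent.get? c ≠ none := by
  induction l with
  | nil => simp
  | cons a t ih =>
    match t with
    | [] =>
      simp only [pvRChain] at h
      intro c hc; simp at hc; subst hc; simp [h.2]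
    | d :: t' =>
      simp only [pvRChain] at h
      intro c hc
      rcases List.mem_cons.mp hc with rfl | hc
      · simp [h.1]
      · exact ih h.2 c hc

lemma pvRChain_insert (parent : PySem.Dict (Int × Int) (Option (Int × Int)))
    (l : List (Int × Int)) (k : Int × Int) (v : Option (Int × Int))
    (hk : parent.get? k = none) (h : pvRChain parent l) :
    pvRChain (parent.insert k v) l := by
  induction l with
  | nil => exact h
  | cons a t ih =>
    match t with
    | [] =>
      simp only [pvRChain] at h ⊢
      refine ⟨h.1, ?_⟩
      rw [PySem.Dict.get?_insert_of_ne]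
      · exact h.2
      · rintro rfl; rw [hk] at h; exact absurd h.2 (by simp)
    | d :: t' =>
      simp only [pvRChain] at h ⊢
      refine ⟨?_, ih h.2⟩
      rw [PySem.Dict.get?_insert_of_ne]
      · exact h.1
      · rintro rfl; rw [hk] at h; exact absurd h.1 (by simp)

lemma pvWalk_eq_of_rchain (parent : PySem.Dict (Int × Int) (Option (Int × Int)))
    (t : List (Int × Int)) : ∀ (c : Int × Int) (fuel : Nat), pvRChain parent (c :: t) →
    t.length ≤ fuel → pvWalk parent fuel c = c :: t := by
  induction t with
  | nil =>
    intro c fuel h _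
    simp only [pvRChain] at h
    match fuel with
    | 0 => rfl
    | f + 1 => simp [pvWalk, h.2]
  | cons d t' ih =>
    intro c fuel h hf
    simp only [pvRChain] at h
    match fuel with
    | 0 => simp at hf
    | f + 1 =>
      simp only [pvWalk, h.1]
      rw [ih d f h.2 (by simpa using hf)]

lemma pvDrain (m n : Int) : ∀ (f : Nat) (q : List (List (Int × Int) × (Int × Int)))
    (vis : PySem.Set (Int × Int)) (cam : List (List (Int × Int))),
    (m - 1, n - 1) ∈ vis → (∀ pr ∈ q, pr.2 ≠ (m - 1, n - 1)) →
    pvALoop m n f q vis cam = cam := by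
  intro f
  induction f with
  | zero => intro q vis cam _ _; rfl
  | succ f ih =>
    rintro (_ | ⟨⟨camino, x, y⟩, rest⟩) vis cam hd hq
    · rfl
    · have hxy : ¬ ((x, y) = (m - 1, n - 1)) := hq _ (List.mem_cons_self ..)
      rw [pvALoop, if_neg hxy]
      set s1 := if y + 3 < n ∧ (x, y + 3) ∉ vis then
          (rest ++ [(camino ++ [(x, y + 3)], (x, y + 3))], PySem.Set.add vis (x, y + 3))
        else (rest, vis) with hs1
      set s2 := if x + 2 < m ∧ (x + 2, y) ∉ s1.2 then
          (s1.1 ++ [(camino ++ [(x + 2, y)], (x + 2, y))], PySem.Set.add s1.2 (x + 2, y))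
        else s1 with hs2
      have h1 : (m - 1, n - 1) ∈ s1.2 ∧ ∀ pr ∈ s1.1, pr.2 ≠ (m - 1, n - 1) := by
        rw [hs1]; split_ifs with hg
        · refine ⟨by simp [PySem.Set.mem_add, hd], ?_⟩
          intro pr hpr
          rcases List.mem_append.mp hpr with hpr | hpr
          · exact hq _ (List.mem_cons_of_mem _ hpr)
          · simp at hpr; subst hpr; intro h; simp at h; exact hg.2 (by rw [h.1, h.2]; exact hd)
        · exact ⟨hd, fun pr hpr => hq _ (List.mem_cons_of_mem _ hpr)⟩
      have h2 : (m - 1, n - 1) ∈ s2.2 ∧ ∀ pr ∈ s2.1, pr.2 ≠ (m - 1, n - 1) := by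
        rw [hs2]; split_ifs with hg
        · refine ⟨by simp [PySem.Set.mem_add, h1.1], ?_⟩
          intro pr hpr
          rcases List.mem_append.mp hpr with hpr | hpr
          · exact h1.2 _ hpr
          · simp at hpr; subst hpr; intro h; simp at h; exact hg.2 (by rw [h.1, h.2]; exact h1.1)
        · exact h1
      exact ih s2.1 s2.2 cam h2.1 h2.2

lemma pvPush (q : List (List (Int × Int) × (Int × Int))) (vis : PySem.Set (Int × Int))
    (parent : PySem.Dict (Int × Int) (Option (Int × Int)))
    (camino : List (Int × Int)) (x y : Int) (c : Int × Int)
    (h : pvInv q vis parent) (hcp : pvChainPair parent vis (camino, (x, y)))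
    (hc : c ∉ vis) :
    pvInv (q ++ [(camino ++ [c], c)]) (PySem.Set.add vis c)
        (parent.insert c (some (x, y))) ∧
      pvChainPair (parent.insert c (some (x, y))) (PySem.Set.add vis c) (camino, (x, y)) := by
  obtain ⟨h1, hk, hnd, hq⟩ := h
  have hcget : parent.get? c = none := by
    by_contra hne; exact hc ((h1 c).mpr hne)
  have hchain_pres : ∀ pr, pvChainPair parent vis pr →
      pvChainPair (parent.insert c (some (x, y))) (PySem.Set.add vis c) pr := by
    rintro ⟨l, p⟩ ⟨hrc, hh, hndl, hmem⟩
    exact ⟨pvRChain_insert _ _ _ _ hcget hrc, hh, hndl,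
      fun d hd => by simp [PySem.Set.mem_add]; exact Or.inl (hmem d hd)⟩
  have hcp' := hchain_pres _ hcp
  refine ⟨⟨?_, ?_, ?_, ?_⟩, hcp'⟩
  · intro d
    by_cases hdc : d = c
    · subst hdc
      simp [PySem.Set.mem_add, PySem.Dict.get?_insert_self]
    · rw [PySem.Dict.get?_insert_of_ne _ _ hdc]
      simp [PySem.Set.mem_add, hdc, h1 d]
  · exact PySem.Dict.nodup_keys_insert _ _ _ hk
  · rw [List.map_append]
    simp only [List.map_cons, List.map_nil]
    rw [List.nodup_append]
    refine ⟨hnd, List.nodup_singleton _, ?_⟩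
    intro a ha
    have hpr : ∃ pr ∈ q, pr.2 = a := by
      simpa using ha
    obtain ⟨pr, hprq, rfl⟩ := hpr
    have hcp2 := hq pr hprq
    have : pr.2 ∈ pr.1 := by
      have hh := hcp2.2.1
      have : pr.2 ∈ pr.1.reverse := List.mem_of_mem_head? hh
      simpa using this
    have : pr.2 ∈ vis := hcp2.2.2.2 _ this
    simp; intro he; exact hc (he ▸ this)
  · intro pr hpr
    rcases List.mem_append.mp hpr with hpr | hpr
    · exact hchain_pres _ (hq pr hpr)
    · simp at hpr; subst hpr
      have hcamvis := hcp.2.2.2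
      have hxy_head := hcp.2.1
      refine ⟨?_, ?_, ?_, ?_⟩
      · show pvRChain _ (camino ++ [c]).reverse
        rw [List.reverse_append]
        simp only [List.reverse_cons, List.reverse_nil, List.nil_append, List.singleton_append]
        -- goal: pvRChain parent' (c :: camino.reverse)
        have hrev : ∃ t, camino.reverse = (x, y) :: t := by
          have := hcp.2.1
          simp only at this
          cases hrv : camino.reverse with
          | nil => rw [hrv] at this; simp at this
          | cons a t => rw [hrv] at this; simp at this; exact ⟨t, by rw [this]⟩
        obtain ⟨t, ht⟩ := hrev
        rw [ht]
        show pvRChain _ (c :: (x, y) :: t)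
        refine ⟨PySem.Dict.get?_insert_self .., ?_⟩
        rw [← ht]
        exact pvRChain_insert _ _ _ _ hcget hcp.1
      · simp
      · show (camino ++ [c]).Nodup
        rw [List.nodup_append]
        exact ⟨hcp.2.2.1, List.nodup_singleton _,
          by intro a ha; simp; intro he; exact hc (he ▸ hcamvis a ha)⟩
      · intro d hd
        rcases List.mem_append.mp hd with hd | hd
        · simp [PySem.Set.mem_add]; exact Or.inl (hcamvis d hd)
        · simp at hd; subst hd; simp [PySem.Set.mem_add]

lemma pvChain_length_le (parent : PySem.Dict (Int × Int) (Option (Int × Int)))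
    (l : List (Int × Int)) (h : pvRChain parent l) (hnd : l.Nodup)
    : l.length ≤ parent.keys.length := by
  have hsub : l ⊆ parent.keys := by
    intro c hc
    have hne := pvRChain_mem_isSome parent l h c hc
    by_contra hmem
    exact hne ((PySem.Dict.get?_eq_none_iff_not_mem_keys parent c).mpr hmem)
  exact (List.subperm_of_subset hnd hsub).length_le

lemma pvSim (m n : Int) : ∀ (f : Nat) (q : List (List (Int × Int) × (Int × Int)))
    (vis : PySem.Set (Int × Int)) (parent : PySem.Dict (Int × Int) (Option (Int × Int)))
    (cam : List (List (Int × Int))), pvInv q vis parent →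
    pvALoop m n f q vis cam = cam ++ pvBLoop m n f (q.map Prod.snd) parent := by
  intro f
  induction f with
  | zero => intro q vis parent cam _; simp [pvALoop, pvBLoop]
  | succ f ih =>
    rintro (_ | ⟨⟨camino, x, y⟩, rest⟩) vis parent cam hinv
    · simp [pvALoop, pvBLoop]
    · obtain ⟨h1, hk, hnd, hq⟩ := hinv
      have hcp := hq _ (List.mem_cons_self ..)
      simp only [pvChainPair] at hcp
      have hxyc : (x, y) ∈ camino := by
        simpa using List.mem_of_mem_head? hcp.2.1
      have hxyv : (x, y) ∈ vis := hcp.2.2.2 _ hxyc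
      have hnd' : (x, y) ∉ rest.map Prod.snd ∧ (rest.map Prod.snd).Nodup := by
        simpa using hnd
      have hinvrest : pvInv rest vis parent :=
        ⟨h1, hk, hnd'.2, fun pr hpr => hq pr (List.mem_cons_of_mem _ hpr)⟩
      simp only [List.map_cons]
      by_cases hdest : (x, y) = (m - 1, n - 1)
      · rw [pvALoop, if_pos hdest, pvBLoop, if_pos hdest]
        have hdrain : pvALoop m n f rest vis (cam ++ [camino]) = cam ++ [camino] := by
          apply pvDrain
          · rw [← hdest]; exact hxyv
          · intro pr hpr heq
            have hmem : pr.2 ∈ rest.map Prod.snd := List.mem_map_of_mem hpr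
            rw [heq, ← hdest] at hmem
            exact hnd'.1 hmem
        rw [hdrain]
        congr 1
        obtain ⟨t, ht⟩ : ∃ t, camino.reverse = (x, y) :: t := by
          cases hrv : camino.reverse with
          | nil => rw [hrv] at hcp; simp [pvRChain] at hcp
          | cons a t =>
            have := hcp.2.1
            rw [hrv] at this; simp at this
            exact ⟨t, by rw [this]⟩
        have hlen : t.length ≤ parent.keys.length := by
          have := pvChain_length_le parent camino.reverse hcp.1
            (List.nodup_reverse.mpr hcp.2.2.1)
          rw [ht] at this; simp at this; omega
        rw [pvWalk_eq_of_rchain parent t (x, y) parent.keys.length (ht ▸ hcp.1) hlen]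
        rw [← ht, List.reverse_reverse]
      · rw [pvALoop, if_neg hdest, pvBLoop, if_neg hdest]
        simp only []
        by_cases hg1 : y + 3 < n ∧ (x, y + 3) ∉ vis
        · have hg1' : y + 3 < n ∧ parent.get? (x, y + 3) = none := by
            refine ⟨hg1.1, ?_⟩
            by_contra hne; exact hg1.2 ((h1 _).mpr hne)
          rw [if_pos hg1, if_pos hg1']
          obtain ⟨hinv1, hcp1⟩ := pvPush rest vis parent camino x y (x, y + 3) hinvrest hcp hg1.2
          by_cases hg2 : x + 2 < m ∧ (x + 2, y) ∉ PySem.Set.add vis (x, y + 3)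
          · have hg2' : x + 2 < m ∧
                (parent.insert (x, y + 3) (some (x, y))).get? (x + 2, y) = none := by
              refine ⟨hg2.1, ?_⟩
              by_contra hne; exact hg2.2 ((hinv1.1 _).mpr hne)
            rw [if_pos hg2, if_pos hg2']
            obtain ⟨hinv2, _⟩ := pvPush _ _ _ camino x y (x + 2, y) hinv1 hcp1 hg2.2
            have := ih _ _ _ cam hinv2
            simpa using this
          · have hg2' : ¬ (x + 2 < m ∧
                (parent.insert (x, y + 3) (some (x, y))).get? (x + 2, y) = none) := by
              intro hcon
              exact hg2 ⟨hcon.1, fun hmem => absurd ((hinv1.1 _).mp hmem) (by simp [hcon.2])⟩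
            rw [if_neg hg2, if_neg hg2']
            have := ih _ _ _ cam hinv1
            simpa using this
        · have hg1' : ¬ (y + 3 < n ∧ parent.get? (x, y + 3) = none) := by
            intro hcon
            exact hg1 ⟨hcon.1, fun hmem => absurd ((h1 _).mp hmem) (by simp [hcon.2])⟩
          rw [if_neg hg1, if_neg hg1']
          by_cases hg2 : x + 2 < m ∧ (x + 2, y) ∉ vis
          · have hg2' : x + 2 < m ∧ parent.get? (x + 2, y) = none := by
              refine ⟨hg2.1, ?_⟩
              by_contra hne; exact hg2.2 ((h1 _).mpr hne)
            rw [if_pos hg2, if_pos hg2']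
            obtain ⟨hinv1, _⟩ := pvPush rest vis parent camino x y (x + 2, y) hinvrest hcp hg2.2
            have := ih _ _ _ cam hinv1
            simpa using this
          · have hg2' : ¬ (x + 2 < m ∧ parent.get? (x + 2, y) = none) := by
              intro hcon
              exact hg2 ⟨hcon.1, fun hmem => absurd ((h1 _).mp hmem) (by simp [hcon.2])⟩
            rw [if_neg hg2, if_neg hg2']
            exact ih _ _ _ cam hinvrest

-- ===== VERDICT (by name: the statement is the Claim_ definition above) =====
theorem caminos_posibles_fuerza_bruta_spec : Claim_equal_caminos_posibles_fuerza_bruta := by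
  intro m n _
  show _ = _
  unfold caminos_posibles_fuerza_bruta caminos_posibles_fuerza_bruta_alt
  have hinv0 : pvInv [([(0, 0)], (0, 0))] (PySem.Set.add PySem.Set.empty (0, 0))
      (PySem.Dict.insert PySem.Dict.empty (0, 0) none) := by
    refine ⟨?_, by decide, by decide, ?_⟩
    · intro c
      by_cases hc : c = ((0 : Int), (0 : Int))
      · subst hc; simp [PySem.Set.add, PySem.Dict.get?_insert_self]
      · rw [PySem.Dict.get?_insert_of_ne _ _ hc]
        simp only [PySem.Dict.get?_empty]
        constructor
        · intro hmem; exact absurd (by simpa [PySem.Set.add] using hmem) hc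
        · intro hne; exact absurd rfl hne
    · rintro pr hpr
      simp only [List.mem_singleton] at hpr
      subst hpr
      refine ⟨?_, by decide, by decide, by decide⟩
      show pvRChain _ [((0 : Int), (0 : Int))]
      exact ⟨rfl, PySem.Dict.get?_insert_self ..⟩
  have h := pvSim m n (m.toNat * n.toNat + 1) [([(0, 0)], (0, 0))]
    (PySem.Set.add PySem.Set.empty (0, 0)) (PySem.Dict.insert PySem.Dict.empty (0, 0) none) [] hinv0
  simpa using h
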